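-- pv_equiv track=rewrite | github.com/SchmidtDSE/api_dock | api_box/config.py | _route_matches_pattern
-- ===== SOURCE A (Python) =====
-- def _route_matches_pattern(route: str, pattern: str) -> bool:
--     """Check if a route matches a specific pattern.
--
--     Patterns use <> as wildcards for path segments.
--     Examples:
--         - "<>/delete" matches "users/123/delete"
--         - "<>" matches "users/123"
--         - "users/<>/permissions" matches "users/123/permissions"
--
--     Args:
--         route: The route to check.
--         pattern: The pattern to match against.
--
--     Returns:
--         True if route matches pattern, False otherwise.
--     """
--     route_parts = route.strip("/").split("/")
--     pattern_parts = pattern.strip("/").split("/")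
--
--     if len(route_parts) != len(pattern_parts):
--         return False
--
--     for route_part, pattern_part in zip(route_parts, pattern_parts):
--         if pattern_part != "<>" and pattern_part != route_part:
--             return False
--
--     return True
-- ===== SOURCE B (Python) =====
-- def _route_matches_pattern(route: str, pattern: str) -> bool:
--     """Recursive two-list matcher: no explicit length check; the base cases
--     reject when one segment list runs out before the other."""
--     def go(rs, ps):
--         if not rs:
--             return not ps
--         if not ps:
--             return False
--         return (ps[0] == "<>" or ps[0] == rs[0]) and go(rs[1:], ps[1:])
--     return go(route.strip("/").split("/"), pattern.strip("/").split("/"))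
-- ===== Notes on version B (the rewrite author's own statement) =====
-- stated objective: alternative
-- what changed: Replaces A's separate length check plus for-loop over zip(route_parts, pattern_parts) with a single structural recursion over the two segment lists, whose base cases subsume the length comparison.
import Mathlib
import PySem

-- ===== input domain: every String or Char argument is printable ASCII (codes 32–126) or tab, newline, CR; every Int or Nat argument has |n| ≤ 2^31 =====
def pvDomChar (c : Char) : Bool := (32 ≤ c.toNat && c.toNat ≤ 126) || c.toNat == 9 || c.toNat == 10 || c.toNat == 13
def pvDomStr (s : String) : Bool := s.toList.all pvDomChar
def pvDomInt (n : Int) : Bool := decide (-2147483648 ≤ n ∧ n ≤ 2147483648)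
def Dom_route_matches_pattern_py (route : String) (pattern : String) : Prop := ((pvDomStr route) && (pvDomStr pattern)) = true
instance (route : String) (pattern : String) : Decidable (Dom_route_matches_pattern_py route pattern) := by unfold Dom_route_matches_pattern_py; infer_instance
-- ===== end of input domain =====

-- B replaces A's length check + for-loop over zip with one structural recursion over both segment lists (objective: alternative decomposition).

-- ===== PORT A =====
-- s.split("/"): exact, since the separator "/" is non-empty (split? is none only for "")
def pvSplitSlash (s : String) : List String := (PySem.Str.split? s "/").getD []

-- the for-loop over zip(route_parts, pattern_parts) with early return False
def pvALoop : List (String × String) → Bool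
  | [] => true
  | (route_part, pattern_part) :: rest =>
      if pattern_part ≠ "<>" ∧ pattern_part ≠ route_part then false
      else pvALoop rest

def route_matches_pattern_py (route : String) (pattern : String) : Bool :=
  let route_parts := pvSplitSlash (PySem.Str.stripChars route "/")
  let pattern_parts := pvSplitSlash (PySem.Str.stripChars pattern "/")
  if route_parts.length ≠ pattern_parts.length then false
  else pvALoop (route_parts.zip pattern_parts)

-- ===== PORT B =====
def pvBGo : List String → List String → Bool
  | [], ps => ps.isEmpty
  | _ :: _, [] => false
  | r :: rs, p :: ps => (p == "<>" || p == r) && pvBGo rs ps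

def route_matches_pattern_py_alt (route : String) (pattern : String) : Bool :=
  pvBGo (pvSplitSlash (PySem.Str.stripChars route "/"))
        (pvSplitSlash (PySem.Str.stripChars pattern "/"))

-- ===== PRECONDITION & SPEC =====
def Spec_route_matches_pattern_py (route : String) (pattern : String) (out : Bool) : Prop := out = route_matches_pattern_py_alt route pattern
instance (route : String) (pattern : String) (out : Bool) : Decidable (Spec_route_matches_pattern_py route pattern out) := by unfold Spec_route_matches_pattern_py; infer_instance

-- ===== CLAIM (what is proved, stated in full; the proofs are below) =====
def Claim_equal_route_matches_pattern_py : Prop := ∀ (route : String) (pattern : String), Dom_route_matches_pattern_py route pattern → Spec_route_matches_pattern_py route pattern (route_matches_pattern_py route pattern)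

-- ===== LEMMAS AND PROOFS =====
theorem pvBGo_ne_length (rs ps : List String) (h : rs.length ≠ ps.length) :
    pvBGo rs ps = false := by
  induction rs generalizing ps with
  | nil => cases ps with
    | nil => exact absurd rfl h
    | cons p ps => simp [pvBGo, List.isEmpty]
  | cons r rs ih =>
    cases ps with
    | nil => simp [pvBGo]
    | cons p ps =>
      simp only [pvBGo, ih ps (by simp_all [List.length_cons]), Bool.and_false]

theorem pvLoop_eq_go (rs ps : List String) :
    (if rs.length ≠ ps.length then false else pvALoop (rs.zip ps)) = pvBGo rs ps := by
  induction rs generalizing ps with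
  | nil => cases ps <;> simp [pvALoop, pvBGo, List.isEmpty]
  | cons r rs ih =>
    cases ps with
    | nil => simp [pvBGo]
    | cons p ps =>
      have h := ih ps
      by_cases hl : rs.length = ps.length
      · simp only [List.length_cons, hl, ne_eq, not_true_eq_false, if_false,
          List.zip_cons_cons, pvALoop, pvBGo]
        by_cases h1 : p = "<>"
        · simpa [h1, hl] using h
        · by_cases h2 : p = r
          · simpa [h1, h2, hl] using h
          · simp [h1, h2]
      · have : ¬ ((r :: rs).length = (p :: ps).length) := by
          simp [List.length_cons]; omega
        simp only [ne_eq, this, not_false_iff, if_true, pvBGo]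
        rw [pvBGo_ne_length rs ps hl]
        simp

-- ===== VERDICT (by name: the statement is the Claim_ definition above) =====
theorem route_matches_pattern_py_spec : Claim_equal_route_matches_pattern_py := by
  intro route pattern _
  unfold Spec_route_matches_pattern_py route_matches_pattern_py route_matches_pattern_py_alt
  exact pvLoop_eq_go _ _
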